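-- pv_equiv track=rewrite | github.com/tariq-hasan/leetcode | coding_patterns/07-graphs/03-union-find-disjoint-set-union/medium_959_regions_cut_by_slashes.py | regionsBySlashesDFS
-- ===== SOURCE A (Python) =====
-- from typing import List
--
-- def regionsBySlashesDFS(grid: List[str]) -> int:
--     """
--     DFS Solution with 3x3 Expansion
--
--     Key insight: Expand each 1x1 cell to 3x3 grid.
--     Draw slashes as blocked cells, then count connected regions via DFS.
--
--     Time Complexity: O(N^2) for grid expansion and DFS
--     Space Complexity: O(N^2) for expanded grid
--     """
--     n = len(grid)
--     # Expand to 3*n x 3*n grid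
--     expanded = [[0] * (3 * n) for _ in range(3 * n)]
--
--     # Fill expanded grid based on slashes
--     for i in range(n):
--         for j in range(n):
--             cell = grid[i][j]
--             base_i, base_j = 3 * i, 3 * j
--
--             if cell == '/':
--                 # Draw forward slash
--                 expanded[base_i][base_j + 2] = 1
--                 expanded[base_i + 1][base_j + 1] = 1
--                 expanded[base_i + 2][base_j] = 1
--
--             elif cell == '\\':
--                 # Draw back slash
--                 expanded[base_i][base_j] = 1
--                 expanded[base_i + 1][base_j + 1] = 1
--                 expanded[base_i + 2][base_j + 2] = 1
--
--     # Count connected components using DFS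
--     visited = [[False] * (3 * n) for _ in range(3 * n)]
--     regions = 0
--
--     def dfs(x, y):
--         """DFS to mark connected region"""
--         if (x < 0 or x >= 3 * n or y < 0 or y >= 3 * n or
--             visited[x][y] or expanded[x][y] == 1):
--             return
--
--         visited[x][y] = True
--
--         # Explore 4 directions
--         for dx, dy in [(0, 1), (1, 0), (0, -1), (-1, 0)]:
--             dfs(x + dx, y + dy)
--
--     # Find all regions
--     for i in range(3 * n):
--         for j in range(3 * n):
--             if not visited[i][j] and expanded[i][j] == 0:
--                 dfs(i, j)
--                 regions += 1
--
--     return regions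
-- ===== SOURCE B (Python) =====
-- from typing import List
--
-- def regionsBySlashesDFS(grid: List[str]) -> int:
--     """
--     Iterative flood fill on the virtual 3x3-expanded grid: blockedness is
--     computed on the fly from the original character (no expanded matrix),
--     and each region is swept with an explicit stack instead of recursion.
--     """
--     n = len(grid)
--     N = 3 * n
--
--     def blocked(x, y):
--         c = grid[x // 3][y // 3]
--         if c == '/':
--             return x % 3 + y % 3 == 2
--         if c == '\\':
--             return x % 3 == y % 3
--         return False
--
--     visited = [[False] * N for _ in range(N)]
--     regions = 0
--     for x in range(N):
--         for y in range(N):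
--             if visited[x][y] or blocked(x, y):
--                 continue
--             regions += 1
--             stack = [(x, y)]
--             while stack:
--                 a, b = stack.pop()
--                 if a < 0 or a >= N or b < 0 or b >= N or visited[a][b] or blocked(a, b):
--                     continue
--                 visited[a][b] = True
--                 stack.extend(((a - 1, b), (a, b - 1), (a + 1, b), (a, b + 1)))
--     return regions
-- ===== Notes on version B (the rewrite author's own statement) =====
-- stated objective: alternative
-- what changed: Replaces the materialized 3nx3n expanded matrix and recursive DFS with an on-the-fly blockedness formula (x%3,y%3 against the cell's character) and an iterative explicit-stack flood fill.
import Mathlib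
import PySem

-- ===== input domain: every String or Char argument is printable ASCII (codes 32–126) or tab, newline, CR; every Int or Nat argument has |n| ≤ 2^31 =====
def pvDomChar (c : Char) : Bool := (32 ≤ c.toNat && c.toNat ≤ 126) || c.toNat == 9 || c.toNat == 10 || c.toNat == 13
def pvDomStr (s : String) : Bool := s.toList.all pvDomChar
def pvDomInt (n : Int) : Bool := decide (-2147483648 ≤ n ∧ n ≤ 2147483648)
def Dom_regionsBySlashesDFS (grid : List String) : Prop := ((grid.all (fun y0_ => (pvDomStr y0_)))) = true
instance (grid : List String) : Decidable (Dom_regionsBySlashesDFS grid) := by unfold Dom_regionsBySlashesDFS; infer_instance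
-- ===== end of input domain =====

-- B replaces A's materialized 3n×3n expanded matrix + recursive DFS by an on-the-fly
-- blockedness formula and an iterative explicit-stack flood fill (objective: alternative).

-- shared 2D accessors: Python's m[x][y] read / write on a list of lists
def pvGet2 {α : Type} (m : List (List α)) (d : α) (x y : Nat) : α := (m.getD x []).getD y d
def pvSet2 {α : Type} (m : List (List α)) (x y : Nat) (a : α) : List (List α) :=
  m.set x ((m.getD x []).set y a)
-- grid[i][j] as both programs read it (out of range, where Python raises IndexError,
-- it defaults to ' '; such grids are excluded by Pre_)
def pvCellChar (grid : List String) (i j : Nat) : Char :=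
  (PySem.Str.pyGet? (grid.getD i "") (j : Int)).getD ' '

-- ===== PORT A =====
def pvFillCell (grid : List String) (e : List (List Int)) (i j : Nat) : List (List Int) :=
  let cell := pvCellChar grid i j
  if cell = '/' then
    pvSet2 (pvSet2 (pvSet2 e (3*i) (3*j+2) 1) (3*i+1) (3*j+1) 1) (3*i+2) (3*j) 1
  else if cell = '\\' then
    pvSet2 (pvSet2 (pvSet2 e (3*i) (3*j) 1) (3*i+1) (3*j+1) 1) (3*i+2) (3*j+2) 1
  else e

def pvExpandedOf (grid : List String) : List (List Int) :=
  let n := grid.length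
  (PySem.List.pyRange 0 (n : Int) 1).foldl (fun e i =>
    (PySem.List.pyRange 0 (n : Int) 1).foldl (fun e j =>
      pvFillCell grid e i.toNat j.toNat) e)
    (List.replicate (3*n) (List.replicate (3*n) (0 : Int)))

-- A's recursive dfs, threading the visited matrix; fuel is a totality guard only
-- (the port always passes 9*n*n+1, which the proofs show is never exhausted)
def pvDfsA (N : Nat) (exp : List (List Int)) :
    Nat → Int → Int → List (List Bool) → List (List Bool)
  | 0, _, _, v => v
  | f+1, x, y, v =>
    if x < 0 ∨ (N : Int) ≤ x ∨ y < 0 ∨ (N : Int) ≤ y ∨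
        pvGet2 v false x.toNat y.toNat = true ∨ pvGet2 exp 0 x.toNat y.toNat = 1 then v
    else
      let v1 := pvSet2 v x.toNat y.toNat true
      [((0:Int),(1:Int)), (1,0), (0,-1), (-1,0)].foldl
        (fun w (d : Int × Int) => pvDfsA N exp f (x + d.1) (y + d.2) w) v1

def regionsBySlashesDFS (grid : List String) : Int :=
  let n := grid.length
  let expanded := pvExpandedOf grid
  let res := (PySem.List.pyRange 0 ((3*n : Nat) : Int) 1).foldl (fun (st : List (List Bool) × Int) i =>
      (PySem.List.pyRange 0 ((3*n : Nat) : Int) 1).foldl (fun st j =>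
        if pvGet2 st.1 false i.toNat j.toNat = false ∧ pvGet2 expanded 0 i.toNat j.toNat = 0 then
          (pvDfsA (3*n) expanded (9*n*n+1) i j st.1, st.2 + 1)
        else st) st)
      (List.replicate (3*n) (List.replicate (3*n) false), (0 : Int))
  res.2

-- ===== PORT B =====
-- blocked(x, y): is virtual expanded cell (x,y) drawn over by the slash of cell (x/3, y/3)?
def pvBlocked (grid : List String) (x y : Nat) : Bool :=
  let c := pvCellChar grid (x / 3) (y / 3)
  if c = '/' then decide (x % 3 + y % 3 = 2)
  else if c = '\\' then decide (x % 3 = y % 3)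
  else false

-- B's while-stack flood fill; fuel is a totality guard only (the port always passes
-- 45*n*n+2, which the proofs show is never exhausted)
def pvRunB (grid : List String) (N : Nat) :
    Nat → List (Int × Int) → List (List Bool) → List (List Bool)
  | 0, _, v => v
  | _+1, [], v => v
  | f+1, (a, b) :: st, v =>
    if a < 0 ∨ (N : Int) ≤ a ∨ b < 0 ∨ (N : Int) ≤ b ∨
        pvGet2 v false a.toNat b.toNat = true ∨ pvBlocked grid a.toNat b.toNat = true then
      pvRunB grid N f st v
    else
      let v1 := pvSet2 v a.toNat b.toNat true
      pvRunB grid N f ((a, b+1) :: (a+1, b) :: (a, b-1) :: (a-1, b) :: st) v1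

def regionsBySlashesDFS_alt (grid : List String) : Int :=
  let n := grid.length
  let res := (PySem.List.pyRange 0 ((3*n : Nat) : Int) 1).foldl (fun (st : List (List Bool) × Int) x =>
      (PySem.List.pyRange 0 ((3*n : Nat) : Int) 1).foldl (fun st y =>
        if pvGet2 st.1 false x.toNat y.toNat = true ∨ pvBlocked grid x.toNat y.toNat = true then st
        else (pvRunB grid (3*n) (45*n*n+2) [(x, y)] st.1, st.2 + 1)) st)
      (List.replicate (3*n) (List.replicate (3*n) false), (0 : Int))
  res.2

-- ===== PRECONDITION & SPEC =====
-- Pre_ excludes exactly the grids having a row shorter than len(grid): there A's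
-- grid[i][j] raises IndexError; on every other input A returns normally.
def Pre_regionsBySlashesDFS (grid : List String) : Prop :=
  ∀ s ∈ grid, (grid.length : Int) ≤ PySem.Str.len s
instance (grid : List String) : Decidable (Pre_regionsBySlashesDFS grid) := by
  unfold Pre_regionsBySlashesDFS; infer_instance
def pvWitness_regionsBySlashesDFS : List String := [" /", "\\ "]
def Spec_regionsBySlashesDFS (grid : List String) (out : Int) : Prop := out = regionsBySlashesDFS_alt grid
instance (grid : List String) (out : Int) : Decidable (Spec_regionsBySlashesDFS grid out) := by unfold Spec_regionsBySlashesDFS; infer_instance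

-- ===== CLAIM (what is proved, stated in full; the proofs are below) =====
def Claim_equal_regionsBySlashesDFS : Prop := ∀ (grid : List String), Dom_regionsBySlashesDFS grid → Pre_regionsBySlashesDFS grid → Spec_regionsBySlashesDFS grid (regionsBySlashesDFS grid)

-- ===== LEMMAS AND PROOFS =====

def pvDims {α : Type} (m : List (List α)) (N : Nat) : Prop :=
  m.length = N ∧ ∀ r ∈ m, r.length = N

lemma pvRow_mem {α : Type} (m : List (List α)) (x : Nat) (hxm : x < m.length) :
    m.getD x [] ∈ m := by
  rw [List.getD_eq_getElem?_getD, List.getElem?_eq_getElem hxm]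
  exact List.getElem_mem hxm

lemma pvGet2_set2_eq {α : Type} (m : List (List α)) (d a : α) (x y N : Nat)
    (hd : pvDims m N) (hx : x < N) (hy : y < N) :
    pvGet2 (pvSet2 m x y a) d x y = a := by
  obtain ⟨hl, hr⟩ := hd
  have hxm : x < m.length := by omega
  have hrow : (m[x]?.getD []).length = N := by
    rw [← List.getD_eq_getElem?_getD]; exact hr _ (pvRow_mem m x hxm)
  have hyr : y < ((m[x]?.getD []).set y a).length := by simp [hrow]; omega
  simp [pvGet2, pvSet2, List.getD_eq_getElem?_getD, List.getElem?_set_self hxm,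
    List.getElem?_eq_getElem hyr]

lemma pvGet2_set2_ne {α : Type} (m : List (List α)) (d a : α) (x y x' y' : Nat)
    (h : ¬ (x = x' ∧ y = y')) :
    pvGet2 (pvSet2 m x y a) d x' y' = pvGet2 m d x' y' := by
  by_cases hx : x = x'
  · subst hx
    have hy : y ≠ y' := by tauto
    by_cases hxm : x < m.length
    · simp [pvGet2, pvSet2, List.getD_eq_getElem?_getD, List.getElem?_set_self hxm,
        List.getElem?_set_ne hy]
    · unfold pvGet2 pvSet2
      rw [List.set_eq_of_length_le (by omega)]
  · simp [pvGet2, pvSet2, List.getD_eq_getElem?_getD, List.getElem?_set_ne hx]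

lemma pvDims_set2 {α : Type} (m : List (List α)) (a : α) (x y N : Nat)
    (hd : pvDims m N) : pvDims (pvSet2 m x y a) N := by
  obtain ⟨hl, hr⟩ := hd
  by_cases hxm : x < m.length
  · refine ⟨by simp [pvSet2, hl], ?_⟩
    intro r hrm
    rcases List.mem_or_eq_of_mem_set hrm with h | h
    · exact hr _ h
    · subst h
      have := hr _ (pvRow_mem m x hxm)
      rw [List.getD_eq_getElem?_getD] at this
      simp [this]
  · rw [pvSet2, List.set_eq_of_length_le (by omega)]; exact ⟨hl, hr⟩

lemma pvDims_replicate {α : Type} (a : α) (N : Nat) :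
    pvDims (List.replicate N (List.replicate N a)) N := by
  refine ⟨by simp, ?_⟩
  intro r hr
  simp [List.eq_of_mem_replicate hr]

def pvUnvis (N : Nat) (v : List (List Bool)) : Nat :=
  (((Finset.range N) ×ˢ (Finset.range N)).filter (fun p => pvGet2 v false p.1 p.2 = false)).card

def pvVle (v w : List (List Bool)) : Prop :=
  ∀ x y : Nat, pvGet2 v false x y = true → pvGet2 w false x y = true

lemma pvUnvis_le (N : Nat) (v : List (List Bool)) : pvUnvis N v ≤ N * N := by
  calc pvUnvis N v ≤ ((Finset.range N) ×ˢ (Finset.range N)).card := Finset.card_filter_le _ _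
    _ = N * N := by simp

lemma pvUnvis_mark (N : Nat) (v : List (List Bool)) (x y : Nat) (hd : pvDims v N)
    (hx : x < N) (hy : y < N) (h : pvGet2 v false x y = false) :
    pvUnvis N (pvSet2 v x y true) + 1 = pvUnvis N v := by
  have hmem : (x, y) ∈ ((Finset.range N) ×ˢ (Finset.range N)).filter
      (fun p => pvGet2 v false p.1 p.2 = false) := by
    simp [Finset.mem_filter, Finset.mem_product, hx, hy, h]
  have hset : ((Finset.range N) ×ˢ (Finset.range N)).filter
        (fun p => pvGet2 (pvSet2 v x y true) false p.1 p.2 = false) =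
      (((Finset.range N) ×ˢ (Finset.range N)).filter
        (fun p => pvGet2 v false p.1 p.2 = false)).erase (x, y) := by
    ext p
    rcases p with ⟨px, py⟩
    by_cases hp : x = px ∧ y = py
    · obtain ⟨h1, h2⟩ := hp; subst h1; subst h2
      simp [Finset.mem_filter, Finset.mem_erase,
        pvGet2_set2_eq v false true x y N hd hx hy]
    · rw [Finset.mem_filter, Finset.mem_erase, Finset.mem_filter,
        pvGet2_set2_ne v false true x y px py hp]
      constructor
      · intro hm
        refine ⟨?_, hm⟩
        simp only [ne_eq, Prod.ext_iff]
        tauto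
      · intro hm; exact hm.2
  unfold pvUnvis
  rw [hset, Finset.card_erase_of_mem hmem]
  have : 0 < (((Finset.range N) ×ˢ (Finset.range N)).filter
      (fun p => pvGet2 v false p.1 p.2 = false)).card := Finset.card_pos.mpr ⟨_, hmem⟩
  omega

lemma pvUnvis_mono (N : Nat) (v w : List (List Bool)) (h : pvVle v w) :
    pvUnvis N w ≤ pvUnvis N v := by
  apply Finset.card_le_card
  intro p hp
  simp only [Finset.mem_filter] at hp ⊢
  refine ⟨hp.1, ?_⟩
  by_contra hc
  have : pvGet2 v false p.1 p.2 = true := by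
    cases hv : pvGet2 v false p.1 p.2
    · exact absurd hv hc
    · rfl
  have := h p.1 p.2 this
  simp [this] at hp

lemma pvGet2_set2_self_cases {α : Type} (m : List (List α)) (d a : α) (x y : Nat) :
    pvGet2 (pvSet2 m x y a) d x y = a ∨
      pvGet2 (pvSet2 m x y a) d x y = pvGet2 m d x y := by
  by_cases hxm : x < m.length
  · by_cases hyr : y < (m.getD x []).length
    · left
      simp only [pvGet2, pvSet2, List.getD_eq_getElem?_getD, List.getElem?_set_self hxm,
        Option.getD_some]
      rw [List.getElem?_eq_getElem (by simp only [List.length_set]; rw [← List.getD_eq_getElem?_getD]; exact hyr)]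
      simp [List.getElem_set_self]
    · right
      rw [pvSet2, List.set_eq_of_length_le (l := m.getD x []) (by omega)]
      simp only [pvGet2, List.getD_eq_getElem?_getD, List.getElem?_set_self hxm,
        Option.getD_some]
  · right
    rw [pvSet2, List.set_eq_of_length_le (by omega)]

lemma pvVle_set2 (v : List (List Bool)) (x y : Nat) :
    pvVle v (pvSet2 v x y true) := by
  intro a b hab
  by_cases hp : x = a ∧ y = b
  · obtain ⟨h1, h2⟩ := hp; subst h1; subst h2
    rcases pvGet2_set2_self_cases v false true x y with h | h
    · exact h
    · rw [h]; exact hab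
  · rw [pvGet2_set2_ne v false true x y a b hp]
    exact hab

lemma pvVle_refl (v : List (List Bool)) : pvVle v v := fun _ _ h => h

lemma pvVle_trans {u v w : List (List Bool)} (h1 : pvVle u v) (h2 : pvVle v w) : pvVle u w :=
  fun x y h => h2 x y (h1 x y h)

lemma pvDfsA_vle (N : Nat) (exp : List (List Int)) :
    ∀ (f : Nat) (x y : Int) (v : List (List Bool)), pvVle v (pvDfsA N exp f x y v) := by
  intro f
  induction f with
  | zero => intro x y v; exact pvVle_refl v
  | succ f ih =>
    intro x y v
    show pvVle v (pvDfsA N exp (f+1) x y v)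
    rw [pvDfsA]
    split
    · exact pvVle_refl v
    · have hfold : ∀ (l : List (Int × Int)) (w : List (List Bool)),
          pvVle w (l.foldl (fun w d => pvDfsA N exp f (x + d.1) (y + d.2) w) w) := by
        intro l
        induction l with
        | nil => intro w; exact pvVle_refl w
        | cons p t iht =>
          intro w
          simp only [List.foldl_cons]
          exact pvVle_trans (ih _ _ w) (iht _)
      exact pvVle_trans (pvVle_set2 v _ _) (hfold _ _)

lemma pvDfsA_dims (N : Nat) (exp : List (List Int)) :
    ∀ (f : Nat) (x y : Int) (v : List (List Bool)), pvDims v N → pvDims (pvDfsA N exp f x y v) N := by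
  intro f
  induction f with
  | zero => intro x y v hd; exact hd
  | succ f ih =>
    intro x y v hd
    rw [pvDfsA]
    split
    · exact hd
    · have hfold : ∀ (l : List (Int × Int)) (w : List (List Bool)), pvDims w N →
          pvDims (l.foldl (fun w d => pvDfsA N exp f (x + d.1) (y + d.2) w) w) N := by
        intro l
        induction l with
        | nil => intro w hw; exact hw
        | cons p t iht =>
          intro w hw
          simp only [List.foldl_cons]
          exact iht _ (ih _ _ w hw)
      exact hfold _ _ (pvDims_set2 v true _ _ N hd)

lemma pvDfsA_fuel (N : Nat) (exp : List (List Int)) :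
    ∀ k : Nat, ∀ (v : List (List Bool)) (x y : Int) (F F' : Nat),
      pvDims v N → pvUnvis N v ≤ k → k < F → k < F' →
      pvDfsA N exp F x y v = pvDfsA N exp F' x y v := by
  intro k
  induction k using Nat.strong_induction_on with
  | _ k ih =>
    intro v x y F F' hd hu hF hF'
    obtain ⟨F1, rfl⟩ : ∃ F1, F = F1 + 1 := ⟨F - 1, by omega⟩
    obtain ⟨F2, rfl⟩ : ∃ F2, F' = F2 + 1 := ⟨F' - 1, by omega⟩
    rw [pvDfsA, pvDfsA]
    split
    · rfl
    · rename_i hg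
      push_neg at hg
      obtain ⟨hx0, hxN, hy0, hyN, hv, _⟩ := hg
      have hxr : x.toNat < N := by omega
      have hyr : y.toNat < N := by omega
      have hget : pvGet2 v false x.toNat y.toNat = false := by
        cases h : pvGet2 v false x.toNat y.toNat
        · rfl
        · exact absurd h hv
      have hmark := pvUnvis_mark N v x.toNat y.toNat hd hxr hyr hget
      have hd1 : pvDims (pvSet2 v x.toNat y.toNat true) N := pvDims_set2 v true _ _ N hd
      have hu1 : pvUnvis N (pvSet2 v x.toNat y.toNat true) ≤ k - 1 := by omega
      have hk1 : 1 ≤ k := by omega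
      have hfold : ∀ (l : List (Int × Int)) (w : List (List Bool)),
          pvDims w N → pvUnvis N w ≤ k - 1 →
          l.foldl (fun w d => pvDfsA N exp F1 (x + d.1) (y + d.2) w) w =
            l.foldl (fun w d => pvDfsA N exp F2 (x + d.1) (y + d.2) w) w := by
        intro l
        induction l with
        | nil => intro w _ _; rfl
        | cons p t iht =>
          intro w hw hwu
          simp only [List.foldl_cons]
          have heq : pvDfsA N exp F1 (x + p.1) (y + p.2) w =
              pvDfsA N exp F2 (x + p.1) (y + p.2) w :=
            ih (k - 1) (by omega) w _ _ F1 F2 hw hwu (by omega) (by omega)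
          rw [heq]
          exact iht _ (pvDfsA_dims N exp F2 _ _ w hw)
            (le_trans (pvUnvis_mono N w _ (pvDfsA_vle N exp F2 _ _ w)) hwu)
      exact hfold _ _ hd1 hu1

def pvCellWrites (c : Char) (i j : Nat) : List (Nat × Nat) :=
  if c = '/' then [(3*i, 3*j+2), (3*i+1, 3*j+1), (3*i+2, 3*j)]
  else if c = '\\' then [(3*i, 3*j), (3*i+1, 3*j+1), (3*i+2, 3*j+2)]
  else []

def pvAllWrites (grid : List String) : List (Nat × Nat) :=
  (List.range grid.length).flatMap (fun i =>
    (List.range grid.length).flatMap (fun j => pvCellWrites (pvCellChar grid i j) i j))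

lemma pvFillCell_eq (grid : List String) (e : List (List Int)) (i j : Nat) :
    pvFillCell grid e i j =
      (pvCellWrites (pvCellChar grid i j) i j).foldl (fun e p => pvSet2 e p.1 p.2 1) e := by
  simp only [pvFillCell, pvCellWrites]
  split_ifs <;> rfl

lemma pvExpandedOf_eq (grid : List String) :
    pvExpandedOf grid = (pvAllWrites grid).foldl (fun e p => pvSet2 e p.1 p.2 1)
      (List.replicate (3*grid.length) (List.replicate (3*grid.length) (0 : Int))) := by
  simp only [pvExpandedOf, pvAllWrites]
  rw [PySem.List.pyRange_zero_natCast, List.foldl_map, List.foldl_flatMap]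
  apply PySem.List.foldl_congr_mem
  intro acc x hx
  rw [List.foldl_map, List.foldl_flatMap]
  apply PySem.List.foldl_congr_mem
  intro acc2 y hy
  simp [pvFillCell_eq]

lemma pvWrites_get (e0 : List (List Int)) (N : Nat) (W : List (Nat × Nat)) (x y : Nat)
    (hd : pvDims e0 N) (hW : ∀ p ∈ W, p.1 < N ∧ p.2 < N) :
    pvGet2 (W.foldl (fun e p => pvSet2 e p.1 p.2 1) e0) 0 x y =
      if (x, y) ∈ W then 1 else pvGet2 e0 0 x y := by
  induction W generalizing e0 with
  | nil => simp
  | cons p t ih =>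
    simp only [List.foldl_cons]
    rw [ih _ (pvDims_set2 _ _ _ _ _ hd) (fun q hq => hW q (List.mem_cons_of_mem p hq))]
    by_cases hmem : (x, y) ∈ t
    · simp [hmem]
    · by_cases hp : p = (x, y)
      · subst hp
        have := hW (x, y) (List.mem_cons_self ..)
        simp [hmem, pvGet2_set2_eq e0 0 1 x y N hd this.1 this.2]
      · have hne : ¬ (p.1 = x ∧ p.2 = y) := by
          intro hc; exact hp (Prod.ext hc.1 hc.2)
        simp [hmem, hp, pvGet2_set2_ne e0 0 1 p.1 p.2 x y hne]
        intro hc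
        exact absurd hc.symm hp

lemma pvAllWrites_bound (grid : List String) (p : Nat × Nat) (hp : p ∈ pvAllWrites grid) :
    p.1 < 3 * grid.length ∧ p.2 < 3 * grid.length := by
  simp only [pvAllWrites, List.mem_flatMap, List.mem_range] at hp
  obtain ⟨i, hi, j, hj, hm⟩ := hp
  unfold pvCellWrites at hm
  split_ifs at hm <;> simp only [List.mem_cons, List.not_mem_nil, or_false] at hm <;>
    rcases hm with h | h | h <;> subst h <;> simp <;> omega

lemma pvMem_allWrites (grid : List String) (x y : Nat)
    (hx : x < 3 * grid.length) (hy : y < 3 * grid.length) :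
    ((x, y) ∈ pvAllWrites grid) ↔ pvBlocked grid x y = true := by
  constructor
  · intro h
    simp only [pvAllWrites, List.mem_flatMap, List.mem_range] at h
    obtain ⟨i, hi, j, hj, hm⟩ := h
    unfold pvCellWrites at hm
    split_ifs at hm with h1 h2 <;>
      simp only [List.mem_cons, List.not_mem_nil, or_false, Prod.mk.injEq] at hm
    · have hdiv : x / 3 = i ∧ y / 3 = j := by omega
      simp [pvBlocked, hdiv.1, hdiv.2, h1]
      omega
    · have hdiv : x / 3 = i ∧ y / 3 = j := by omega
      simp [pvBlocked, hdiv.1, hdiv.2, h1, h2]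
      omega
  · intro h
    simp only [pvBlocked] at h
    have hmem : (x, y) ∈ pvCellWrites (pvCellChar grid (x / 3) (y / 3)) (x / 3) (y / 3) := by
      split_ifs at h with h1 h2
      · replace h := of_decide_eq_true h
        simp [pvCellWrites, h1, Prod.ext_iff]
        omega
      · replace h := of_decide_eq_true h
        simp [pvCellWrites, h1, h2, Prod.ext_iff]
        omega
    simp only [pvAllWrites, List.mem_flatMap, List.mem_range]
    exact ⟨x / 3, by omega, y / 3, by omega, hmem⟩

lemma pvGet2_replicate_zero (N x y : Nat) :
    pvGet2 (List.replicate N (List.replicate N (0 : Int))) 0 x y = 0 := by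
  simp only [pvGet2, List.getD_eq_getElem?_getD, List.getElem?_replicate]
  split_ifs <;> simp [List.getElem?_replicate] <;> split_ifs <;> simp

lemma pvExpanded_get (grid : List String) (x y : Nat)
    (hx : x < 3 * grid.length) (hy : y < 3 * grid.length) :
    pvGet2 (pvExpandedOf grid) 0 x y = if pvBlocked grid x y then 1 else 0 := by
  rw [pvExpandedOf_eq,
    pvWrites_get _ (3 * grid.length) _ x y (pvDims_replicate _ _) (pvAllWrites_bound grid)]
  rw [pvGet2_replicate_zero]
  by_cases hb : pvBlocked grid x y = true
  · rw [if_pos ((pvMem_allWrites grid x y hx hy).mpr hb), if_pos hb]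
  · rw [if_neg (fun hc => hb ((pvMem_allWrites grid x y hx hy).mp hc)), if_neg hb]

lemma pvRunB_sim (grid : List String) (N : Nat) (exp : List (List Int)) (FA : Nat)
    (hE : ∀ x y : Nat, x < N → y < N →
      (pvGet2 exp 0 x y = 1 ↔ pvBlocked grid x y = true))
    (hFA : N * N < FA) :
    ∀ (Fb : Nat) (S : List (Int × Int)) (v : List (List Bool)),
      pvDims v N → 5 * pvUnvis N v + S.length < Fb →
      pvRunB grid N Fb S v = S.foldl (fun w p => pvDfsA N exp FA p.1 p.2 w) v := by
  intro Fb
  induction Fb with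
  | zero => intro S v _ h; omega
  | succ f ih =>
    intro S v hd hm
    obtain ⟨FA1, hFA1⟩ : ∃ t, FA = t + 1 := ⟨FA - 1, by omega⟩
    have hNN : pvUnvis N v ≤ N * N := pvUnvis_le N v
    cases S with
    | nil => rw [pvRunB]; rfl
    | cons p S' =>
      rcases p with ⟨a, b⟩
      rw [pvRunB]
      simp only [List.foldl_cons]
      by_cases hr : a < 0 ∨ (N : Int) ≤ a ∨ b < 0 ∨ (N : Int) ≤ b
      · rw [if_pos (by tauto)]
        have hdfs : pvDfsA N exp FA a b v = v := by
          rw [hFA1, pvDfsA, if_pos (by tauto)]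
        rw [hdfs]
        exact ih S' v hd (by simp at hm ⊢; omega)
      · push_neg at hr
        obtain ⟨ha0, haN, hb0, hbN⟩ := hr
        have haT : a.toNat < N := by omega
        have hbT : b.toNat < N := by omega
        by_cases hvb : pvGet2 v false a.toNat b.toNat = true ∨
            pvBlocked grid a.toNat b.toNat = true
        · rw [if_pos (by tauto)]
          have hdfs : pvDfsA N exp FA a b v = v := by
            rw [hFA1, pvDfsA, if_pos ?_]
            rcases hvb with h | h
            · tauto
            · exact Or.inr (Or.inr (Or.inr (Or.inr (Or.inr ((hE _ _ haT hbT).mpr h)))))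
          rw [hdfs]
          exact ih S' v hd (by simp at hm ⊢; omega)
        · push_neg at hvb
          obtain ⟨hv, hb⟩ := hvb
          have hv' : pvGet2 v false a.toNat b.toNat = false := by
            cases h : pvGet2 v false a.toNat b.toNat
            · rfl
            · exact absurd h hv
          rw [if_neg (by
            intro hc
            rcases hc with h | h | h | h | h | h
            · omega
            · omega
            · omega
            · omega
            · exact hv h
            · exact hb h)]
          have hmark := pvUnvis_mark N v a.toNat b.toNat hd haT hbT hv'
          have hd1 : pvDims (pvSet2 v a.toNat b.toNat true) N := pvDims_set2 v true _ _ N hd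
          set v1 := pvSet2 v a.toNat b.toNat true with hv1
          have hu1 : pvUnvis N v1 ≤ N * N - 1 := by omega
          rw [ih _ _ hd1 (by simp at hm ⊢; omega)]
          -- right side: expand dfs at (a,b)
          have hdfs : pvDfsA N exp FA a b v =
              [((0:Int),(1:Int)), (1,0), (0,-1), (-1,0)].foldl
                (fun w (d : Int × Int) => pvDfsA N exp FA1 (a + d.1) (b + d.2) w) v1 := by
            rw [hFA1, pvDfsA, if_neg (by
              intro hc
              rcases hc with h | h | h | h | h | h
              · omega
              · omega
              · omega
              · omega
              · exact hv h
              · exact hb ((hE _ _ haT hbT).mp h))]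
          rw [hdfs]
          simp only [List.foldl_cons, List.foldl_nil]
          have hca : a + (0:Int) = a := by ring
          have hcb : b + (0:Int) = b := by ring
          have hcm1 : b + (-1:Int) = b - 1 := by ring
          have hcm2 : a + (-1:Int) = a - 1 := by ring
          rw [hca, hcb, hcm1, hcm2]
          -- convert fuel FA1 to FA step by step
          have k1 : pvDfsA N exp FA1 a (b+1) v1 = pvDfsA N exp FA a (b+1) v1 :=
            pvDfsA_fuel N exp (N*N-1) v1 _ _ FA1 FA hd1 hu1 (by omega) (by omega)
          rw [k1]
          set w1 := pvDfsA N exp FA a (b+1) v1 with hw1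
          have hdw1 : pvDims w1 N := pvDfsA_dims N exp FA _ _ v1 hd1
          have huw1 : pvUnvis N w1 ≤ N * N - 1 :=
            le_trans (pvUnvis_mono N v1 w1 (pvDfsA_vle N exp FA _ _ v1)) hu1
          have k2 : pvDfsA N exp FA1 (a+1) b w1 = pvDfsA N exp FA (a+1) b w1 :=
            pvDfsA_fuel N exp (N*N-1) w1 _ _ FA1 FA hdw1 huw1 (by omega) (by omega)
          rw [k2]
          set w2 := pvDfsA N exp FA (a+1) b w1 with hw2
          have hdw2 : pvDims w2 N := pvDfsA_dims N exp FA _ _ w1 hdw1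
          have huw2 : pvUnvis N w2 ≤ N * N - 1 :=
            le_trans (pvUnvis_mono N w1 w2 (pvDfsA_vle N exp FA _ _ w1)) huw1
          have k3 : pvDfsA N exp FA1 a (b-1) w2 = pvDfsA N exp FA a (b-1) w2 :=
            pvDfsA_fuel N exp (N*N-1) w2 _ _ FA1 FA hdw2 huw2 (by omega) (by omega)
          rw [k3]
          set w3 := pvDfsA N exp FA a (b-1) w2 with hw3
          have hdw3 : pvDims w3 N := pvDfsA_dims N exp FA _ _ w2 hdw2
          have huw3 : pvUnvis N w3 ≤ N * N - 1 :=
            le_trans (pvUnvis_mono N w2 w3 (pvDfsA_vle N exp FA _ _ w2)) huw2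
          have k4 : pvDfsA N exp FA1 (a-1) b w3 = pvDfsA N exp FA (a-1) b w3 :=
            pvDfsA_fuel N exp (N*N-1) w3 _ _ FA1 FA hdw3 huw3 (by omega) (by omega)
          rw [k4]

lemma pvFoldl_inv {α σ : Type} (Inv : σ → Prop) (f g : σ → α → σ) (l : List α) (s : σ)
    (h0 : Inv s) (hstep : ∀ s a, a ∈ l → Inv s → f s a = g s a ∧ Inv (f s a)) :
    l.foldl f s = l.foldl g s ∧ Inv (l.foldl f s) := by
  induction l generalizing s with
  | nil => exact ⟨rfl, h0⟩
  | cons a t ih =>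
    have h := hstep s a (List.mem_cons_self ..) h0
    simp only [List.foldl_cons]
    have ht := ih (f s a) h.2 (fun s' a' ha' hs' => hstep s' a' (List.mem_cons_of_mem a ha') hs')
    exact ⟨by rw [← h.1]; exact ht.1, ht.2⟩

lemma pvMain (grid : List String) : regionsBySlashesDFS grid = regionsBySlashesDFS_alt grid := by
  simp only [regionsBySlashesDFS, regionsBySlashesDFS_alt,
    PySem.List.pyRange_zero_natCast, List.foldl_map, Int.toNat_natCast]
  set n := grid.length with hn
  set N := 3 * n with hN
  have hE : ∀ x y : Nat, x < N → y < N →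
      (pvGet2 (pvExpandedOf grid) 0 x y = 1 ↔ pvBlocked grid x y = true) := by
    intro x y hx hy
    rw [pvExpanded_get grid x y (by omega) (by omega)]
    constructor
    · intro h
      by_contra hb
      rw [if_neg hb] at h
      exact absurd h (by norm_num)
    · intro h; rw [if_pos h]
  have hmain := pvFoldl_inv (fun st : List (List Bool) × Int => pvDims st.1 N)
    (fun st k => List.foldl (fun st l =>
        if pvGet2 st.1 false k l = false ∧ pvGet2 (pvExpandedOf grid) 0 k l = 0 then
          (pvDfsA N (pvExpandedOf grid) (9*n*n+1) (k : Int) (l : Int) st.1, st.2 + 1)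
        else st) st (List.range N))
    (fun st k => List.foldl (fun st l =>
        if pvGet2 st.1 false k l = true ∨ pvBlocked grid k l = true then st
        else (pvRunB grid N (45*n*n+2) [((k : Int), (l : Int))] st.1, st.2 + 1)) st (List.range N))
    (List.range N)
    (List.replicate N (List.replicate N false), (0 : Int))
    (by exact pvDims_replicate false N)
    ?_
  · exact congrArg Prod.snd hmain.1
  · intro st k hk hst
    refine pvFoldl_inv (fun st : List (List Bool) × Int => pvDims st.1 N)
      _ _ (List.range N) st hst ?_
    intro st2 l hl hst2
    have hkN : k < N := List.mem_range.mp hk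
    have hlN : l < N := List.mem_range.mp hl
    by_cases hv : pvGet2 st2.1 false k l = true
    · rw [if_neg (by simp [hv]), if_pos (Or.inl hv)]
      exact ⟨rfl, hst2⟩
    · have hv' : pvGet2 st2.1 false k l = false := by
        cases h : pvGet2 st2.1 false k l
        · rfl
        · exact absurd h hv
      by_cases hb : pvBlocked grid k l = true
      · have hexp : pvGet2 (pvExpandedOf grid) 0 k l = 1 := (hE k l hkN hlN).mpr hb
        rw [if_neg (by simp [hexp]), if_pos (Or.inr hb)]
        exact ⟨rfl, hst2⟩
      · have hexp : pvGet2 (pvExpandedOf grid) 0 k l = 0 := by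
          rw [pvExpanded_get grid k l (by omega) (by omega), if_neg hb]
        rw [if_pos ⟨hv', hexp⟩, if_neg (by
          intro hc
          rcases hc with h | h
          · exact hv h
          · exact hb h)]
        have hrun : pvRunB grid N (45*n*n+2) [((k : Int), (l : Int))] st2.1 =
            pvDfsA N (pvExpandedOf grid) (9*n*n+1) (k : Int) (l : Int) st2.1 := by
          rw [pvRunB_sim grid N (pvExpandedOf grid) (9*n*n+1) hE (by rw [hN]; ring_nf; omega)
            (45*n*n+2) [((k : Int), (l : Int))] st2.1 hst2 ?_]
          · simp
          · have := pvUnvis_le N st2.1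
            simp only [List.length_cons, List.length_nil]
            have hNN : N * N = 9 * n * n := by rw [hN]; ring
            have h45 : 45 * n * n = 5 * (9 * n * n) := by ring
            omega
        refine ⟨by rw [hrun], ?_⟩
        exact pvDfsA_dims N (pvExpandedOf grid) (9*n*n+1) _ _ st2.1 hst2

-- ===== VERDICT (by name: the statement is the Claim_ definition above) =====
theorem regionsBySlashesDFS_spec : Claim_equal_regionsBySlashesDFS := by
  intro grid _ _
  unfold Spec_regionsBySlashesDFS
  exact pvMain grid
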